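-- pv_equiv track=rewrite | github.com/hamtoy/Test | src/infra/worker.py | _ensure_required_actions
-- ===== SOURCE A (Python) =====
-- def _ensure_required_actions(actions: list[str], request_id: str) -> list[str]:
--     required = {
--         "clean": f"clean:{request_id}",
--         "summarize": f"summarize:{request_id}",
--         "clarify": f"clarify:{request_id}",
--     }
--     for prefix, act in required.items():
--         if not any(a.startswith(prefix + ":") for a in actions):
--             actions.append(act)
--     return actions
-- ===== SOURCE B (Python) =====
-- def _record_prefixes(a, prefixes, present):
--     # record into `present` every required prefix that action `a` carries
--     for p in prefixes:
--         if a.startswith(p + ":"):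
--             present.add(p)
--
-- def _ensure_required_actions(actions: list[str], request_id: str) -> list[str]:
--     # One scan over `actions` records which required prefixes are already present,
--     # then the missing entries are appended in clean -> summarize -> clarify order.
--     prefixes = ("clean", "summarize", "clarify")
--     present = set()
--     for a in actions:
--         _record_prefixes(a, prefixes, present)
--     for p in prefixes:
--         if p not in present:
--             actions.append(p + ":" + request_id)
--     return actions
-- ===== Notes on version B (the rewrite author's own statement) =====
-- stated objective: alternative
-- what changed: Instead of running a fresh any-scan over the (growing) actions list for each of the three required prefixes, B makes one pass over actions collecting the set of prefixes already present and then appends the missing entries in the same clean/summarize/clarify order.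
import Mathlib
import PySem

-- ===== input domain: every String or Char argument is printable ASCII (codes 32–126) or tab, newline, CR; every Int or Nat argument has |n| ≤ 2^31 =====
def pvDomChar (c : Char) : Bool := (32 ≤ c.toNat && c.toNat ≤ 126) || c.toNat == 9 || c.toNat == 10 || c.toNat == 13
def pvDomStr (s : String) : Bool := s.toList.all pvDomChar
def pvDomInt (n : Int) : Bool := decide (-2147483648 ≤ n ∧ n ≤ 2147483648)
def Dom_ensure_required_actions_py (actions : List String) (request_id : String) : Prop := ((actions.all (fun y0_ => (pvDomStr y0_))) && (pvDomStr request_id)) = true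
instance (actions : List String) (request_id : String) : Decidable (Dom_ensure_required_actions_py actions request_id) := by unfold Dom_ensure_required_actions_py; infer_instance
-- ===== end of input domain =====

-- ===== PORT A =====
-- Port of A: iterate the required dict's items, appending when no existing action
-- starts with the prefix (any-scan over the list as it grows, as the Python does).
def ensure_required_actions_py (actions : List String) (request_id : String) : List String :=
  let required : PySem.Dict String String :=
    PySem.Dict.mk [("clean", "clean:" ++ request_id),
                   ("summarize", "summarize:" ++ request_id),
                   ("clarify", "clarify:" ++ request_id)]
  required.items.foldl
    (fun acts pa =>
      if acts.any (fun a => PySem.Str.startswith a (pa.1 ++ ":")) then acts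
      else acts ++ [pa.2])
    actions

-- ===== PORT B =====
-- B-side helper: record into `present` every required prefix that action `a` carries.
def pv_record_prefixes (a : String) (prefixes : List String) (present : PySem.Set String) : PySem.Set String :=
  prefixes.foldl
    (fun pr p => if PySem.Str.startswith a (p ++ ":") then PySem.Set.add pr p else pr)
    present

-- Port of B: one pass over actions building the set of prefixes already present,
-- then append the missing entries in order.
def ensure_required_actions_py_alt (actions : List String) (request_id : String) : List String :=
  let prefixes : List String := ["clean", "summarize", "clarify"]
  let present : PySem.Set String :=
    actions.foldl (fun pr a => pv_record_prefixes a prefixes pr) PySem.Set.empty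
  prefixes.foldl
    (fun acts p => if p ∈ present then acts else acts ++ [p ++ ":" ++ request_id])
    actions

-- ===== PRECONDITION & SPEC =====
def Spec_ensure_required_actions_py (actions : List String) (request_id : String) (out : List String) : Prop := out = ensure_required_actions_py_alt actions request_id
instance (actions : List String) (request_id : String) (out : List String) : Decidable (Spec_ensure_required_actions_py actions request_id out) := by unfold Spec_ensure_required_actions_py; infer_instance

-- ===== CLAIM (what is proved, stated in full; the proofs are below) =====
def Claim_equal_ensure_required_actions_py : Prop := ∀ (actions : List String) (request_id : String), Dom_ensure_required_actions_py actions request_id → Spec_ensure_required_actions_py actions request_id (ensure_required_actions_py actions request_id)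

-- ===== LEMMAS AND PROOFS =====

-- If `y` is neither a prefix of `x` nor an extension of it, no string `x ++ t` starts with `y`.
theorem pv_sw_append_false (x y rid : String)
    (h1 : ¬ y.toList <+: x.toList) (h2 : ¬ x.toList <+: y.toList) :
    PySem.Str.startswith (x ++ rid) y = false := by
  rw [← Bool.not_eq_true, PySem.Str.startswith_eq, PySem.Chars.startswith_iff]
  intro h
  rw [String.toList_append] at h
  rcases List.prefix_or_prefix_of_prefix (List.prefix_append x.toList rid.toList) h with hp | hp
  · exact h2 hp
  · exact h1 hp

theorem pv_step_clean (pr : PySem.Set String) (a : String) :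
    ("clean" ∈ pv_record_prefixes a ["clean", "summarize", "clarify"] pr)
    ↔ "clean" ∈ pr ∨ PySem.Str.startswith a "clean:" = true := by
  simp only [pv_record_prefixes, List.foldl_cons, List.foldl_nil]
  split_ifs <;> simp_all [PySem.Set.mem_add]

theorem pv_step_summarize (pr : PySem.Set String) (a : String) :
    ("summarize" ∈ pv_record_prefixes a ["clean", "summarize", "clarify"] pr)
    ↔ "summarize" ∈ pr ∨ PySem.Str.startswith a "summarize:" = true := by
  simp only [pv_record_prefixes, List.foldl_cons, List.foldl_nil]
  split_ifs <;> simp_all [PySem.Set.mem_add]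

theorem pv_step_clarify (pr : PySem.Set String) (a : String) :
    ("clarify" ∈ pv_record_prefixes a ["clean", "summarize", "clarify"] pr)
    ↔ "clarify" ∈ pr ∨ PySem.Str.startswith a "clarify:" = true := by
  simp only [pv_record_prefixes, List.foldl_cons, List.foldl_nil]
  split_ifs <;> simp_all [PySem.Set.mem_add]

theorem pv_mem_clean (actions : List String) (pr : PySem.Set String) :
    ("clean" ∈ actions.foldl (fun pr a => pv_record_prefixes a ["clean", "summarize", "clarify"] pr) pr)
    ↔ "clean" ∈ pr ∨ actions.any (fun a => PySem.Str.startswith a "clean:") = true := by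
  induction actions generalizing pr with
  | nil => simp
  | cons a as ih =>
    rw [List.foldl_cons, ih, pv_step_clean]
    simp only [List.any_cons, Bool.or_eq_true]
    tauto

theorem pv_mem_summarize (actions : List String) (pr : PySem.Set String) :
    ("summarize" ∈ actions.foldl (fun pr a => pv_record_prefixes a ["clean", "summarize", "clarify"] pr) pr)
    ↔ "summarize" ∈ pr ∨ actions.any (fun a => PySem.Str.startswith a "summarize:") = true := by
  induction actions generalizing pr with
  | nil => simp
  | cons a as ih =>
    rw [List.foldl_cons, ih, pv_step_summarize]
    simp only [List.any_cons, Bool.or_eq_true]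
    tauto

theorem pv_mem_clarify (actions : List String) (pr : PySem.Set String) :
    ("clarify" ∈ actions.foldl (fun pr a => pv_record_prefixes a ["clean", "summarize", "clarify"] pr) pr)
    ↔ "clarify" ∈ pr ∨ actions.any (fun a => PySem.Str.startswith a "clarify:") = true := by
  induction actions generalizing pr with
  | nil => simp
  | cons a as ih =>
    rw [List.foldl_cons, ih, pv_step_clarify]
    simp only [List.any_cons, Bool.or_eq_true]
    tauto

-- ===== VERDICT (by name: the statement is the Claim_ definition above) =====
theorem ensure_required_actions_py_spec : Claim_equal_ensure_required_actions_py := by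
  intro actions rid _
  unfold Spec_ensure_required_actions_py ensure_required_actions_py ensure_required_actions_py_alt
  have e1 : ("clean" ++ ":" : String) = "clean:" := rfl
  have e2 : ("summarize" ++ ":" : String) = "summarize:" := rfl
  have e3 : ("clarify" ++ ":" : String) = "clarify:" := rfl
  have A1 : PySem.Str.startswith ("clean:" ++ rid) "summarize:" = false :=
    pv_sw_append_false _ _ _ (by decide) (by decide)
  have A2 : PySem.Str.startswith ("clean:" ++ rid) "clarify:" = false :=
    pv_sw_append_false _ _ _ (by decide) (by decide)
  have A3 : PySem.Str.startswith ("summarize:" ++ rid) "clarify:" = false :=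
    pv_sw_append_false _ _ _ (by decide) (by decide)
  simp only [List.foldl_cons, List.foldl_nil, e1, e2, e3]
  simp only [pv_mem_clean, pv_mem_summarize, pv_mem_clarify, PySem.Set.empty,
    List.not_mem_nil, false_or]
  by_cases hc : actions.any (fun a => PySem.Str.startswith a "clean:") = true <;>
  by_cases hs : actions.any (fun a => PySem.Str.startswith a "summarize:") = true <;>
  by_cases hl : actions.any (fun a => PySem.Str.startswith a "clarify:") = true <;>
  simp only [Bool.not_eq_true] at hc hs hl <;>
  simp only [hc, hs, hl, List.any_append, List.any_cons, List.any_nil, A1, A2, A3,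
    Bool.or_false, Bool.false_eq_true, if_true, if_false]
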